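-- pv_equiv track=rewrite | github.com/yangwu1227/leetcode-ds-algo | hashing/matrix/python3/maxtirx_sum_query.py | effcient_approach
-- ===== SOURCE A (Python) =====
-- from typing import List, Set
--
-- def effcient_approach(n: int, queries: List[List[int]]) -> int:
--     matrix_sum = 0
--     visited_columns: Set[int] = set()
--     visited_rows: Set[int] = set()
--     vertical_cells_left_to_modify, horizontal_cells_left_to_modify = n, n
--     # Start from the last query and move forward
--     for type_col, index, val in queries[::-1]:
--         # If we have not visited the col and type == 1
--         if type_col and (index not in visited_columns):
--             # Add all cells in this column that we still can modify to 'val'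
--             matrix_sum += val * vertical_cells_left_to_modify
--             # Decrement the numbers of cells horizontally that we can modify in the next query
--             horizontal_cells_left_to_modify -= 1
--             visited_columns.add(index)
--         elif (not type_col) and (index not in visited_rows):
--             # Add all cells in this row that we still can modify to 'val'
--             matrix_sum += val * horizontal_cells_left_to_modify
--             # Decrement the nubmers of cells vertically that we can modify
--             vertical_cells_left_to_modify -= 1
--             visited_rows.add(index)
--     return matrix_sum
-- ===== SOURCE B (Python) =====
-- def effcient_approach(n, queries):
--     # Forward scan: remember, per (kind, index), the LAST query that set it.
--     last = {}
--     for pos, (type_col, index, val) in enumerate(queries):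
--         last[(type_col != 0, index)] = (pos, val)
--     # Gather the surviving writes as events and replay them newest-first.
--     events = [(pos, val, is_col) for (is_col, _), (pos, val) in last.items()]
--     events.sort(key=lambda e: e[0], reverse=True)
--     total = 0
--     vertical_left, horizontal_left = n, n
--     for _, val, is_col in events:
--         if is_col:
--             total += val * vertical_left
--             horizontal_left -= 1
--         else:
--             total += val * horizontal_left
--             vertical_left -= 1
--     return total
-- ===== Notes on version B (the rewrite author's own statement) =====
-- stated objective: alternative
-- what changed: Instead of A's reverse walk with two visited sets, B forward-scans once into a last-write table keyed by (kind, index), sorts the surviving entries by position descending, and replays them with the two remaining-cells counters.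
import Mathlib
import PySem

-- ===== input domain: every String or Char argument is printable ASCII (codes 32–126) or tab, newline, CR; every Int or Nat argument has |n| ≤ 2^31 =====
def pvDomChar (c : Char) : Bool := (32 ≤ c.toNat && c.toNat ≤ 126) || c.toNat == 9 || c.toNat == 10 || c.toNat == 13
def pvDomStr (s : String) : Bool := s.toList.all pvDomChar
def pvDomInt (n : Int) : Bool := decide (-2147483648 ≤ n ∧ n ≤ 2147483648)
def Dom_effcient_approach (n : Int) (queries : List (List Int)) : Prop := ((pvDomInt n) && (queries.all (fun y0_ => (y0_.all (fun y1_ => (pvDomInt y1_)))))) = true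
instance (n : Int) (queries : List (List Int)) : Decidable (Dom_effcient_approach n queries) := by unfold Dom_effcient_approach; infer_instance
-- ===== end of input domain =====

-- B re-implements A by a different decomposition: a forward scan builds a last-write table
-- (dict keyed by (kind, index)), whose entries are then sorted by position descending and
-- replayed; A instead walks the reversed query list with two visited sets. Same cost class.

-- ===== PORT A =====
-- state: (matrix_sum, visited_columns, visited_rows, vertical_left, horizontal_left)
def pvStepA (st : Int × PySem.Set Int × PySem.Set Int × Int × Int) (q : List Int) :
    Int × PySem.Set Int × PySem.Set Int × Int × Int :=
  match q with
  | [type_col, index, val] =>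
    let (s, vc, vr, v, h) := st
    if type_col ≠ 0 ∧ ¬ PySem.Set.contains vc index then
      (s + val * v, PySem.Set.add vc index, vr, v, h - 1)
    else if ¬ (type_col ≠ 0) ∧ ¬ PySem.Set.contains vr index then
      (s + val * h, vc, PySem.Set.add vr index, v - 1, h)
    else st
  | _ => st  -- tuple unpack of a non-3 list raises ValueError in Python: excluded by Pre_

def effcient_approach (n : Int) (queries : List (List Int)) : Int :=
  -- queries[::-1] (PySem.List.slice?_none_none_neg_one: this is queries.reverse)
  (((PySem.List.slice? queries none none (-1)).getD []).foldl pvStepA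
    (0, PySem.Set.empty, PySem.Set.empty, n, n)).1

-- ===== PORT B =====
-- last[(type_col != 0, index)] = (pos, val), forward over enumerate(queries)
def pvBuildLast (queries : List (List Int)) : PySem.Dict (Bool × Int) (Int × Int) :=
  (PySem.List.enumerate queries 0).foldl
    (fun d pq =>
      match pq.2 with
      | [type_col, index, val] => d.insert (decide (type_col ≠ 0), index) (pq.1, val)
      | _ => d)  -- unpack of a non-3 list raises in Python: excluded by Pre_
    PySem.Dict.empty

def pvStepB (acc : Int × Int × Int) (e : Int × Int × Bool) : Int × Int × Int :=
  let (total, v, h) := acc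
  if e.2.2 then (total + e.2.1 * v, v, h - 1) else (total + e.2.1 * h, v - 1, h)

def effcient_approach_alt (n : Int) (queries : List (List Int)) : Int :=
  let events := (pvBuildLast queries).items.map (fun p => (p.2.1, p.2.2, p.1.1))
  let sortedEvents := PySem.List.sorted events (fun e => e.1) true
  (sortedEvents.foldl pvStepB (0, n, n)).1

-- ===== PRECONDITION & SPEC =====
-- Pre_ excludes exactly the queries on which A's 3-tuple unpack raises ValueError.
def Pre_effcient_approach (n : Int) (queries : List (List Int)) : Prop :=
  ∀ q ∈ queries, q.length = 3
instance (n : Int) (queries : List (List Int)) : Decidable (Pre_effcient_approach n queries) := by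
  unfold Pre_effcient_approach; infer_instance

def pvWitness_effcient_approach : Int × List (List Int) :=
  (3, [[0, 1, 2], [1, 0, 5], [1, 0, -2], [0, 1, 4]])

def Spec_effcient_approach (n : Int) (queries : List (List Int)) (out : Int) : Prop := out = effcient_approach_alt n queries
instance (n : Int) (queries : List (List Int)) (out : Int) : Decidable (Spec_effcient_approach n queries out) := by unfold Spec_effcient_approach; infer_instance

-- ===== CLAIM (what is proved, stated in full; the proofs are below) =====
def Claim_equal_effcient_approach : Prop := ∀ (n : Int) (queries : List (List Int)), Dom_effcient_approach n queries → Pre_effcient_approach n queries → Spec_effcient_approach n queries (effcient_approach n queries)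

-- ===== LEMMAS AND PROOFS =====

-- key/value/event read off an enumerated length-3 query, as total functions
def pvKey (p : Int × List Int) : Bool × Int :=
  (decide (PySem.List.pyGetD p.2 0 0 ≠ 0), PySem.List.pyGetD p.2 1 0)
def pvVal (p : Int × List Int) : Int × Int := (p.1, PySem.List.pyGetD p.2 2 0)
def pvEv (p : Int × List Int) : Int × Int × Bool := (p.1, PySem.List.pyGetD p.2 2 0, (pvKey p).1)

-- the distinct last writes, read newest-first (A's traversal order)
def pvDedup : List (Int × List Int) → PySem.Set Int → PySem.Set Int → List (Int × List Int)
  | [], _, _ => []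
  | p :: L, vc, vr =>
    if (pvKey p).1 then
      if PySem.Set.contains vc (pvKey p).2 then pvDedup L vc vr
      else p :: pvDedup L (PySem.Set.add vc (pvKey p).2) vr
    else
      if PySem.Set.contains vr (pvKey p).2 then pvDedup L vc vr
      else p :: pvDedup L vc (PySem.Set.add vr (pvKey p).2)

-- A's step, rephrased on enumerated pairs through the total readers (agrees on length-3 queries)
def pvStepA' (st : Int × PySem.Set Int × PySem.Set Int × Int × Int) (p : Int × List Int) :
    Int × PySem.Set Int × PySem.Set Int × Int × Int :=
  let (s, vc, vr, v, h) := st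
  if (pvKey p).1 then
    if PySem.Set.contains vc (pvKey p).2 then st
    else (s + (pvVal p).2 * v, PySem.Set.add vc (pvKey p).2, vr, v, h - 1)
  else
    if PySem.Set.contains vr (pvKey p).2 then st
    else (s + (pvVal p).2 * h, vc, PySem.Set.add vr (pvKey p).2, v - 1, h)

def pvProj (st : Int × PySem.Set Int × PySem.Set Int × Int × Int) : Int × Int × Int :=
  (st.1, st.2.2.2)

lemma pvStepA_eq (st : Int × PySem.Set Int × PySem.Set Int × Int × Int)
    (q : List Int) (hq : q.length = 3) (pos : Int) :
    pvStepA st q = pvStepA' st (pos, q) := by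
  match q, hq with
  | [t, i, v], _ =>
    obtain ⟨s, vc, vr, vv, hh⟩ := st
    by_cases ht : t = 0 <;>
      by_cases hc : PySem.Set.contains vc i = true <;>
      by_cases hr : PySem.Set.contains vr i = true <;>
      simp [pvStepA, pvStepA', pvKey, pvVal, PySem.List.pyGetD, ht, hc, hr]

-- eliminating the visited sets: A's fold is the plain fold over the deduplicated list
lemma pvFoldA_dedup (L : List (Int × List Int)) :
    ∀ vc vr s v h, pvProj (L.foldl pvStepA' (s, vc, vr, v, h)) =
      (pvDedup L vc vr).foldl (fun acc p => pvStepB acc (pvEv p)) (s, v, h) := by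
  induction L with
  | nil => intro vc vr s v h; simp [pvDedup, pvProj]
  | cons p L ih =>
    intro vc vr s v h
    by_cases hk : (pvKey p).1 = true <;>
      [by_cases hc : (pvKey p).2 ∈ vc;
       by_cases hc : (pvKey p).2 ∈ vr] <;>
      simp [pvDedup, pvStepA', pvStepB, pvEv, pvVal, hk, hc, ih]

-- membership in pvDedup = "first element of L with this key" (and key unseen)
lemma pvMem_dedup (L : List (Int × List Int)) :
    ∀ vc vr p, p ∈ pvDedup L vc vr ↔
      (¬ (if (pvKey p).1 then PySem.Set.contains vc (pvKey p).2
          else PySem.Set.contains vr (pvKey p).2) = true) ∧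
      L.find? (fun p' => pvKey p' == pvKey p) = some p := by
  induction L with
  | nil => intro vc vr p; simp [pvDedup]
  | cons q L ih =>
    intro vc vr p
    by_cases hqp : pvKey q = pvKey p
    · have hk1 : (pvKey p).1 = (pvKey q).1 := by rw [hqp]
      have hk2 : (pvKey p).2 = (pvKey q).2 := by rw [hqp]
      rw [List.find?_cons_of_pos (by simp [hqp])]
      by_cases hk : (pvKey q).1 = true <;>
        [by_cases hc : (pvKey q).2 ∈ vc; by_cases hc : (pvKey q).2 ∈ vr] <;>
        simp [pvDedup, hk, hc, ih, hk1, hk2, PySem.Set.mem_add] <;>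
        constructor <;> intro hx <;> simp [hx]
    · have hne : p ≠ q := fun e => hqp (by rw [e])
      rw [List.find?_cons_of_neg (by simp [hqp])]
      by_cases hk : (pvKey q).1 = true
      · by_cases hc : (pvKey q).2 ∈ vc
        · simp [pvDedup, hk, hc, ih]
        · by_cases hpk : (pvKey p).1 = true
          · have hidx : (pvKey p).2 ≠ (pvKey q).2 :=
              fun h2 => hqp ((Prod.ext (hpk.trans hk.symm) h2).symm)
            simp [pvDedup, hk, hc, hpk, ih, hne, PySem.Set.mem_add, hidx]
          · simp [pvDedup, hk, hc, hpk, ih, hne, PySem.Set.mem_add]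
      · by_cases hc : (pvKey q).2 ∈ vr
        · simp [pvDedup, hk, hc, ih]
        · by_cases hpk : (pvKey p).1 = true
          · simp [pvDedup, hk, hc, hpk, ih, hne, PySem.Set.mem_add]
          · have hb : (pvKey p).1 = (pvKey q).1 := by
              revert hk hpk; cases (pvKey p).1 <;> cases (pvKey q).1 <;> simp
            have hidx : (pvKey p).2 ≠ (pvKey q).2 :=
              fun h2 => hqp ((Prod.ext hb h2).symm)
            simp [pvDedup, hk, hc, hpk, ih, hne, PySem.Set.mem_add, hidx]

lemma pvDedup_sublist (L : List (Int × List Int)) :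
    ∀ vc vr, (pvDedup L vc vr).Sublist L := by
  induction L with
  | nil => intro vc vr; simp [pvDedup]
  | cons q L ih =>
    intro vc vr
    by_cases hk : (pvKey q).1 = true <;>
      [by_cases hc : (pvKey q).2 ∈ vc; by_cases hc : (pvKey q).2 ∈ vr] <;>
      simp only [pvDedup, hk, hc, if_true, if_false, ite_true, ite_false,
        PySem.Set.contains_eq_listContains, List.contains_iff_mem, decide_eq_true_eq] <;>
      first
        | exact List.Sublist.cons q (ih _ _)
        | exact List.Sublist.cons₂ q (ih _ _)
        | (rw [if_neg hc]; exact List.Sublist.cons₂ q (ih _ _))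
        | (rw [if_pos hc]; exact List.Sublist.cons q (ih _ _))

-- the dict fold: lookup returns the value of the LAST insert with that key
lemma pvGet_foldl_insert (L : List (Int × List Int)) :
    ∀ (d : PySem.Dict (Bool × Int) (Int × Int)) (k : Bool × Int),
      (L.foldl (fun d p => d.insert (pvKey p) (pvVal p)) d).get? k =
        match L.reverse.find? (fun p => pvKey p == k) with
        | some p => some (pvVal p)
        | none => d.get? k := by
  induction L with
  | nil => intro d k; simp
  | cons p L ih =>
    intro d k
    rw [List.foldl_cons, ih]
    cases hf : L.reverse.find? (fun p' => pvKey p' == k) with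
    | some x => simp [List.reverse_cons, List.find?_append, hf]
    | none =>
      have hg := PySem.Dict.get?_insert (d := d) (k := pvKey p) (v := pvVal p) (k' := k)
      by_cases hkk : k = pvKey p
      · subst hkk
        simp [List.reverse_cons, List.find?_append, hf, List.find?_cons, hg]
      · have hb : (pvKey p == k) = false := by
          simp only [beq_eq_false_iff_ne]; exact fun e => hkk e.symm
        simp [List.reverse_cons, List.find?_append, hf, List.find?_cons, hg, hkk, hb]

lemma pvLen3 (queries : List (List Int)) (hpre : ∀ q ∈ queries, q.length = 3)
    {p : Int × List Int} (hp : p ∈ PySem.List.enumerate queries 0) : p.2.length = 3 := by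
  rw [PySem.List.mem_enumerate_iff] at hp
  obtain ⟨k, hk, rfl⟩ := hp
  exact hpre _ (List.getElem_mem hk)

-- A's value, as the plain fold over the deduplicated reversed enumeration
lemma pvA_eq_fold (n : Int) (queries : List (List Int)) (hpre : ∀ q ∈ queries, q.length = 3) :
    effcient_approach n queries =
      (((pvDedup (PySem.List.enumerate queries 0).reverse PySem.Set.empty PySem.Set.empty).map
        pvEv).foldl pvStepB (0, n, n)).1 := by
  unfold effcient_approach
  rw [PySem.List.slice?_none_none_neg_one]
  simp only [Option.getD_some]
  have h1 : queries.reverse = (PySem.List.enumerate queries 0).reverse.map (·.2) := by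
    rw [List.map_reverse, PySem.List.map_snd_enumerate]
  rw [h1, List.foldl_map,
    PySem.List.foldl_congr_mem _ _ (fun st p => pvStepA' st p) _ ?hc]
  case hc =>
    intro acc p hp
    have h3 : p.2.length = 3 := pvLen3 queries hpre (List.mem_reverse.mp hp)
    simpa using pvStepA_eq acc p.2 h3 p.1
  have h2 := pvFoldA_dedup (PySem.List.enumerate queries 0).reverse PySem.Set.empty PySem.Set.empty 0 n n
  have h3 : (List.foldl pvStepA' (0, PySem.Set.empty, PySem.Set.empty, n, n)
      (PySem.List.enumerate queries 0).reverse).1 =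
      (pvProj (List.foldl pvStepA' (0, PySem.Set.empty, PySem.Set.empty, n, n)
        (PySem.List.enumerate queries 0).reverse)).1 := rfl
  rw [h3, h2, ← List.foldl_map]

-- B's dict loop, rewritten through the total key/value readers
lemma pvBuildLast_eq (queries : List (List Int)) (hpre : ∀ q ∈ queries, q.length = 3) :
    pvBuildLast queries = (PySem.List.enumerate queries 0).foldl
      (fun d p => d.insert (pvKey p) (pvVal p)) PySem.Dict.empty := by
  unfold pvBuildLast
  apply PySem.List.foldl_congr_mem
  intro d p hp
  have h3 := pvLen3 queries hpre hp
  match p, h3 with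
  | (pos, [t, i, v]), _ => simp [pvKey, pvVal, PySem.List.pyGetD]

lemma pvKeys_nodup (queries : List (List Int)) :
    ((PySem.List.enumerate queries 0).foldl
      (fun d p => d.insert (pvKey p) (pvVal p)) PySem.Dict.empty).keys.Nodup :=
  PySem.Dict.nodup_keys_foldl_insert_key _ _ _ _ PySem.Dict.nodup_keys_empty

-- every stored item is the last write of its key, i.e. the first hit in the reversed scan
lemma pvItem_char (queries : List (List Int)) {k : Bool × Int} {w : Int × Int}
    (hit : (k, w) ∈ ((PySem.List.enumerate queries 0).foldl
      (fun d p => d.insert (pvKey p) (pvVal p)) PySem.Dict.empty).items) :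
    ∃ p, (PySem.List.enumerate queries 0).reverse.find? (fun p' => pvKey p' == k) = some p ∧
      pvKey p = k ∧ w = pvVal p := by
  have hget := PySem.Dict.get?_of_mem_items _ hit (pvKeys_nodup queries)
  rw [pvGet_foldl_insert] at hget
  cases hf : (PySem.List.enumerate queries 0).reverse.find? (fun p' => pvKey p' == k) with
  | none => rw [hf] at hget; simp at hget
  | some p =>
    rw [hf] at hget
    simp only [Option.some_inj] at hget
    exact ⟨p, rfl, by simpa using List.find?_some hf, hget.symm⟩

lemma pvPos_inj (queries : List (List Int)) {p q : Int × List Int}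
    (hp : p ∈ (PySem.List.enumerate queries 0).reverse)
    (hq : q ∈ (PySem.List.enumerate queries 0).reverse) (h : p.1 = q.1) : p = q := by
  have hnd : (((PySem.List.enumerate queries 0).reverse).map (·.1)).Nodup := by
    rw [List.map_reverse, List.nodup_reverse, PySem.List.map_fst_enumerate]
    exact PySem.List.nodup_pyRange_one _ _
  exact List.inj_on_of_nodup_map hnd hp hq h

lemma pvNodup_events (queries : List (List Int)) (hpre : ∀ q ∈ queries, q.length = 3) :
    ((pvBuildLast queries).items.map (fun p => (p.2.1, p.2.2, p.1.1))).Nodup := by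
  rw [pvBuildLast_eq _ hpre]
  have hkeys := pvKeys_nodup queries
  simp only [PySem.Dict.keys] at hkeys
  have hitems : ((PySem.List.enumerate queries 0).foldl
      (fun d p => d.insert (pvKey p) (pvVal p)) PySem.Dict.empty).items.Nodup :=
    List.Nodup.of_map _ hkeys
  refine List.Nodup.map_on ?_ hitems
  rintro ⟨k1, w1⟩ h1 ⟨k2, w2⟩ h2 heq
  obtain ⟨p1, hf1, hk1, hw1⟩ := pvItem_char queries h1
  obtain ⟨p2, hf2, hk2, hw2⟩ := pvItem_char queries h2
  have hpos : p1.1 = p2.1 := by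
    have e1 : w1.1 = p1.1 := by rw [hw1]; rfl
    have e2 : w2.1 = p2.1 := by rw [hw2]; rfl
    have := congrArg (·.1) heq
    simpa [e1, e2] using this
  have hpq : p1 = p2 :=
    pvPos_inj queries (List.mem_of_find?_eq_some hf1) (List.mem_of_find?_eq_some hf2) hpos
  subst hpq
  have : k1 = k2 := hk1.symm.trans hk2
  subst this
  rw [hw1, hw2]

lemma pvMem_events (queries : List (List Int)) (hpre : ∀ q ∈ queries, q.length = 3)
    (e : Int × Int × Bool) :
    e ∈ (pvBuildLast queries).items.map (fun p => (p.2.1, p.2.2, p.1.1)) ↔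
      ∃ p, (PySem.List.enumerate queries 0).reverse.find? (fun p' => pvKey p' == pvKey p) = some p ∧
        e = pvEv p := by
  rw [pvBuildLast_eq _ hpre]
  constructor
  · intro he
    rw [List.mem_map] at he
    obtain ⟨⟨k, w⟩, hit, rfl⟩ := he
    obtain ⟨p, hf, hk, hw⟩ := pvItem_char queries hit
    refine ⟨p, by rw [hk]; exact hf, ?_⟩
    rw [hw, ← hk]
    rfl
  · rintro ⟨p, hf, rfl⟩
    have hget : ((PySem.List.enumerate queries 0).foldl
        (fun d p => d.insert (pvKey p) (pvVal p)) PySem.Dict.empty).get? (pvKey p) =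
        some (pvVal p) := by
      rw [pvGet_foldl_insert, hf]
    exact List.mem_map.mpr ⟨(pvKey p, pvVal p),
      PySem.Dict.mem_items_of_get?_eq_some _ hget, rfl⟩

lemma pvMem_dedup_map (queries : List (List Int)) (e : Int × Int × Bool) :
    e ∈ (pvDedup (PySem.List.enumerate queries 0).reverse PySem.Set.empty PySem.Set.empty).map pvEv ↔
      ∃ p, (PySem.List.enumerate queries 0).reverse.find? (fun p' => pvKey p' == pvKey p) = some p ∧
        e = pvEv p := by
  rw [List.mem_map]
  constructor
  · rintro ⟨p, hp, rfl⟩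
    rw [pvMem_dedup] at hp
    exact ⟨p, hp.2, rfl⟩
  · rintro ⟨p, hf, rfl⟩
    refine ⟨p, ?_, rfl⟩
    rw [pvMem_dedup]
    exact ⟨by simp [PySem.Set.empty], hf⟩

lemma pvDedup_pairwise (queries : List (List Int)) :
    ((pvDedup (PySem.List.enumerate queries 0).reverse PySem.Set.empty PySem.Set.empty).map
      pvEv).Pairwise (fun a b => b.1 < a.1) := by
  rw [List.pairwise_map]
  refine List.Pairwise.sublist (pvDedup_sublist _ PySem.Set.empty PySem.Set.empty) ?_
  rw [List.pairwise_reverse]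
  exact PySem.List.pairwise_lt_enumerate queries 0

lemma pvSorted_eq (queries : List (List Int)) (hpre : ∀ q ∈ queries, q.length = 3) :
    PySem.List.sorted ((pvBuildLast queries).items.map (fun p => (p.2.1, p.2.2, p.1.1)))
        (fun e => e.1) true =
      (pvDedup (PySem.List.enumerate queries 0).reverse PySem.Set.empty PySem.Set.empty).map pvEv := by
  apply PySem.List.sorted_rev_eq_of_perm_of_pairwise_gt
  · have hnd1 : ((pvDedup (PySem.List.enumerate queries 0).reverse PySem.Set.empty
        PySem.Set.empty).map pvEv).Nodup :=
      (pvDedup_pairwise queries).imp (fun h e => by rw [e] at h; exact lt_irrefl _ h)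
    rw [List.perm_ext_iff_of_nodup hnd1 (pvNodup_events queries hpre)]
    intro e
    rw [pvMem_events queries hpre, pvMem_dedup_map]
  · exact pvDedup_pairwise queries

-- ===== VERDICT (by name: the statement is the Claim_ definition above) =====
theorem effcient_approach_spec : Claim_equal_effcient_approach := by
  intro n queries _ hpre
  unfold Spec_effcient_approach effcient_approach_alt
  rw [pvA_eq_fold n queries hpre]
  show _ = (List.foldl pvStepB (0, n, n)
    (PySem.List.sorted ((pvBuildLast queries).items.map (fun p => (p.2.1, p.2.2, p.1.1)))
      (fun e => e.1) true)).1
  rw [pvSorted_eq queries hpre]
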